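-- pv_equiv track=rewrite | github.com/schalappe/baby_foot_elo | backend/app/db/builders/base.py | _format_query_with_indexed_placeholders
-- ===== SOURCE A (Python) =====
-- from typing import Any, List, Optional, Tuple, Union
--
-- def _format_query_with_indexed_placeholders(
--     query_template: str, params: List[Any], start_index: int = 1
-- ) -> Tuple[str, List[Any], int]:
--     """
--     Replaces '?' placeholders in a query template with '$n' style placeholders
--     and reorders parameters accordingly.
--
--     Parameters
--     ----------
--     query_template : str
--         The SQL query template with '?' placeholders.
--     params : List[Any]
--         A list of parameters corresponding to the '?' placeholders.
--     start_index : int, optional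
--         The starting index for the '$n' placeholders (default is 1).
--
--     Returns
--     -------
--     Tuple[str, List[Any], int]
--         A tuple containing:
--         - The formatted query string with '$n' placeholders.
--         - The list of parameters (can be the same if order doesn't change, but returned for consistency).
--         - The next available parameter index.
--     """
--     parts = query_template.split("?")
--     if len(parts) - 1 != len(params):
--         raise ValueError("Mismatch between '?' placeholders and number of parameters provided.")
--
--     formatted_query = ""
--     current_param_idx = start_index
--     param_list_for_clause = []
--
--     for i, part in enumerate(parts):
--         formatted_query += part
--         if i < len(params):
--             formatted_query += f"${current_param_idx}"
--             param_list_for_clause.append(params[i])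
--             current_param_idx += 1
--
--     return formatted_query, param_list_for_clause, current_param_idx
-- ===== SOURCE B (Python) =====
-- from typing import Any, List, Tuple
--
--
-- def _format_query_with_indexed_placeholders(
--     query_template: str, params: List[Any], start_index: int = 1
-- ) -> Tuple[str, List[Any], int]:
--     """Single left-to-right character scan: each '?' becomes '$n' with a running counter."""
--     if query_template.count("?") != len(params):
--         raise ValueError("Mismatch between '?' placeholders and number of parameters provided.")
--     pieces = []
--     next_index = start_index
--     for ch in query_template:
--         if ch == "?":
--             pieces.append(f"${next_index}")
--             next_index += 1
--         else:
--             pieces.append(ch)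
--     return "".join(pieces), list(params), next_index
-- ===== Notes on version B (the rewrite author's own statement) =====
-- stated objective: simpler
-- what changed: Replaces A's split-on-'?' then enumerate-and-reassemble loop (with indexed parameter re-collection) by a single left-to-right character scan that emits '$n' at each '?' with a running counter, validating the placeholder count up front via str.count.
import Mathlib
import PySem

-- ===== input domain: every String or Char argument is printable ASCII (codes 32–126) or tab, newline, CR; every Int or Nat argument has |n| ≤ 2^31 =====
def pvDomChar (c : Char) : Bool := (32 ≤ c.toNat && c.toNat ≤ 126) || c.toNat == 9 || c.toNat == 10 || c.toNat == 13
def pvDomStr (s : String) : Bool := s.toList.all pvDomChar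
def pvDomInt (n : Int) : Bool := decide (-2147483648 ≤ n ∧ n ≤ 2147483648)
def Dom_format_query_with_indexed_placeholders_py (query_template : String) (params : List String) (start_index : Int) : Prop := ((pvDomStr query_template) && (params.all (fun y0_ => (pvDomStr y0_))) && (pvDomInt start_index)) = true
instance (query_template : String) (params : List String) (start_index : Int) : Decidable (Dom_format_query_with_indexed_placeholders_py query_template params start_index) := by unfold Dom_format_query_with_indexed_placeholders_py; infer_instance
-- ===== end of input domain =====

-- B replaces A's split-on-'?'/reassemble loop by a single character scan with a running counter (same asymptotic cost; return value only — neither version mutates its arguments).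


-- ===== PORT A =====
-- parts = query_template.split("?"); raise path (len(parts)-1 != len(params)) is excluded by Pre_;
-- then: for i, part in enumerate(parts): fq += part; if i < len(params): fq += f"${idx}"; plist.append(params[i]); idx += 1
def format_query_with_indexed_placeholders_py (query_template : String) (params : List String) (start_index : Int) : String × List String × Int :=
  let parts := PySem.Chars.splitOn query_template.toList ['?']
  -- if len(parts) - 1 != len(params): raise ValueError  (inputs excluded by Pre_)
  let st := (parts.zipIdx).foldl
    (fun (acc : List Char × List String × Int) pi =>
      let fq := acc.1 ++ pi.1
      if (pi.2 : Int) < (params.length : Int) then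
        (fq ++ '$' :: PySem.Int.toChars acc.2.2,
         acc.2.1 ++ [PySem.List.pyGetD params (pi.2 : Int) ""],
         acc.2.2 + 1)
      else (fq, acc.2.1, acc.2.2))
    ([], [], start_index)
  (String.mk st.1, st.2.1, st.2.2)

-- ===== PORT B =====
-- count check first (raise path excluded by Pre_), then one scan over the characters,
-- appending '$'+str(next_index) for each '?' (the joined pieces are accumulated as chars)
def format_query_with_indexed_placeholders_py_alt (query_template : String) (params : List String) (start_index : Int) : String × List String × Int :=
  -- if query_template.count("?") != len(params): raise ValueError  (inputs excluded by Pre_)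
  let st := query_template.toList.foldl
    (fun (acc : List Char × Int) c =>
      if c = '?' then (acc.1 ++ '$' :: PySem.Int.toChars acc.2, acc.2 + 1)
      else (acc.1 ++ [c], acc.2))
    ([], start_index)
  (String.mk st.1, params, st.2)

-- ===== PRECONDITION & SPEC =====
-- Pre_ excludes exactly the inputs where the number of '?' differs from len(params): both A and B raise ValueError there.
def Pre_format_query_with_indexed_placeholders_py (query_template : String) (params : List String) (start_index : Int) : Prop :=
  PySem.Str.count query_template "?" = params.length
instance (query_template : String) (params : List String) (start_index : Int) : Decidable (Pre_format_query_with_indexed_placeholders_py query_template params start_index) := by unfold Pre_format_query_with_indexed_placeholders_py; infer_instance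
def pvWitness_format_query_with_indexed_placeholders_py : String × List String × Int := ("a=? and b=?", ["x", "y"], 1)

def Spec_format_query_with_indexed_placeholders_py (query_template : String) (params : List String) (start_index : Int) (out : String × List String × Int) : Prop := out = format_query_with_indexed_placeholders_py_alt query_template params start_index
instance (query_template : String) (params : List String) (start_index : Int) (out : String × List String × Int) : Decidable (Spec_format_query_with_indexed_placeholders_py query_template params start_index out) := by unfold Spec_format_query_with_indexed_placeholders_py; infer_instance

-- ===== CLAIM (what is proved, stated in full; the proofs are below) =====
def Claim_equal_format_query_with_indexed_placeholders_py : Prop := ∀ (query_template : String) (params : List String) (start_index : Int), Dom_format_query_with_indexed_placeholders_py query_template params start_index → Pre_format_query_with_indexed_placeholders_py query_template params start_index → Spec_format_query_with_indexed_placeholders_py query_template params start_index (format_query_with_indexed_placeholders_py query_template params start_index)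

-- ===== LEMMAS AND PROOFS =====

-- `consHead p xs` prepends p to the first block of xs
def consHead (p : List Char) : List (List Char) → List (List Char)
  | [] => [p]
  | q :: qs => (p ++ q) :: qs

-- structural form of split-on-'?'
def mySplit : List Char → List (List Char)
  | [] => [[]]
  | c :: r => if c = '?' then [] :: mySplit r else consHead [c] (mySplit r)

-- the common result string: parts interleaved with '$i', '$(i+1)', …
def weave : List (List Char) → Int → List Char
  | [], _ => []
  | p :: ps, i => p ++ (if ps.isEmpty then [] else '$' :: PySem.Int.toChars i ++ weave ps (i + 1))

-- structural core of B's scan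
def bcore : List Char → Int → List Char
  | [], _ => []
  | c :: r, i => if c = '?' then '$' :: PySem.Int.toChars i ++ bcore r (i + 1) else c :: bcore r i

theorem mySplit_ne_nil (cs : List Char) : mySplit cs ≠ [] := by
  cases cs with
  | nil => simp [mySplit]
  | cons c r =>
    simp only [mySplit]
    split
    · simp
    · cases h : mySplit r <;> simp [consHead]

theorem consHead_nil_of_ne (xs : List (List Char)) (h : xs ≠ []) : consHead [] xs = xs := by
  cases xs with
  | nil => exact absurd rfl h
  | cons q qs => simp [consHead]

theorem splitOn_go_q (l : List Char) : ∀ (fuel : Nat) (cur : List Char) (acc : List (List Char)),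
    l.length ≤ fuel →
    PySem.Chars.splitOn.go ['?'] fuel l cur acc = acc.reverse ++ consHead cur.reverse (mySplit l) := by
  induction l with
  | nil =>
    intro fuel cur acc _
    cases fuel <;> simp [PySem.Chars.splitOn.go, mySplit, consHead]
  | cons c r ih =>
    intro fuel cur acc hf
    cases fuel with
    | zero => simp at hf
    | succ f =>
      simp only [List.length_cons, Nat.succ_le_succ_iff] at hf
      by_cases hc : c = '?'
      · subst hc
        have hpre : List.isPrefixOf ['?'] ('?' :: r) = true := by
          simp [List.isPrefixOf]
        rw [PySem.Chars.splitOn.go]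
        simp only [hpre, if_pos]
        rw [show List.drop (['?'] : List Char).length ('?' :: r) = r by simp]
        rw [ih f [] (cur.reverse :: acc) hf]
        cases h : mySplit r with
        | nil => exact absurd h (mySplit_ne_nil r)
        | cons q qs => simp [mySplit, consHead, h]
      · have hpre : List.isPrefixOf ['?'] (c :: r) = false := by
          simp [List.isPrefixOf]
          exact fun h => absurd h.symm hc
        rw [PySem.Chars.splitOn.go]
        simp only [hpre, Bool.false_eq_true, if_neg, not_false_iff]
        rw [ih f (c :: cur) acc hf]
        have : mySplit (c :: r) = consHead [c] (mySplit r) := by simp [mySplit, hc]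
        rw [this]
        cases h : mySplit r with
        | nil => exact absurd h (mySplit_ne_nil r)
        | cons q qs => simp [consHead]

theorem splitOn_q (cs : List Char) : PySem.Chars.splitOn cs ['?'] = mySplit cs := by
  unfold PySem.Chars.splitOn
  rw [splitOn_go_q cs (cs.length + 1) [] [] (by omega)]
  simp [consHead_nil_of_ne _ (mySplit_ne_nil cs)]

theorem count_go_q (l : List Char) : ∀ (fuel : Nat) (acc : Nat), l.length ≤ fuel →
    PySem.Chars.count.go ['?'] fuel l acc = acc + l.count '?' := by
  induction l with
  | nil => intro fuel acc _; cases fuel <;> simp [PySem.Chars.count.go]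
  | cons c r ih =>
    intro fuel acc hf
    cases fuel with
    | zero => simp at hf
    | succ f =>
      simp only [List.length_cons, Nat.succ_le_succ_iff] at hf
      by_cases hc : c = '?'
      · subst hc
        have hpre : List.isPrefixOf ['?'] ('?' :: r) = true := by simp [List.isPrefixOf]
        rw [PySem.Chars.count.go]
        simp only [hpre, if_pos]
        rw [show List.drop (['?'] : List Char).length ('?' :: r) = r by simp]
        rw [ih f (acc + 1) hf]
        simp [List.count_cons]
        omega
      · have hpre : List.isPrefixOf ['?'] (c :: r) = false := by
          simp [List.isPrefixOf]
          exact fun h => absurd h.symm hc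
        rw [PySem.Chars.count.go]
        simp only [hpre, Bool.false_eq_true, if_neg, not_false_iff]
        rw [ih f acc hf]
        simp [List.count_cons, hc]

theorem count_q (cs : List Char) : PySem.Chars.count cs ['?'] = cs.count '?' := by
  unfold PySem.Chars.count
  simp only [List.isEmpty_cons, Bool.false_eq_true, if_neg, not_false_iff]
  rw [count_go_q cs cs.length 0 le_rfl]; omega

theorem length_mySplit (cs : List Char) : (mySplit cs).length = cs.count '?' + 1 := by
  induction cs with
  | nil => simp [mySplit]
  | cons c r ih =>
    by_cases hc : c = '?'
    · subst hc; simp [mySplit, ih]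
    · simp only [mySplit, hc, if_neg, not_false_iff]
      cases h : mySplit r with
      | nil => exact absurd h (mySplit_ne_nil r)
      | cons q qs =>
        have := ih; rw [h] at this
        simp [consHead, List.count_cons, hc, ← this]

theorem weave_consHead (a : List Char) (q : List Char) (qs : List (List Char)) (i : Int) :
    weave (consHead a (q :: qs)) i = a ++ weave (q :: qs) i := by
  simp [consHead, weave]

theorem bcore_eq_weave (cs : List Char) : ∀ (i : Int), bcore cs i = weave (mySplit cs) i := by
  induction cs with
  | nil => intro i; simp [bcore, mySplit, weave]
  | cons c r ih =>
    intro i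
    by_cases hc : c = '?'
    · subst hc
      have hne : (mySplit r).isEmpty = false := by
        cases h : mySplit r with
        | nil => exact absurd h (mySplit_ne_nil r)
        | cons q qs => simp
      simp [bcore, mySplit, weave, hne, ih]
    · simp only [bcore, hc, if_neg, not_false_iff, mySplit]
      cases h : mySplit r with
      | nil => exact absurd h (mySplit_ne_nil r)
      | cons q qs =>
        rw [weave_consHead]
        have := ih i; rw [h] at this
        simp [← this]

theorem bfold (cs : List Char) : ∀ (acc : List Char) (i : Int),
    cs.foldl (fun (acc : List Char × Int) c =>
        if c = '?' then (acc.1 ++ '$' :: PySem.Int.toChars acc.2, acc.2 + 1)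
        else (acc.1 ++ [c], acc.2)) (acc, i)
      = (acc ++ bcore cs i, i + (cs.count '?' : Int)) := by
  induction cs with
  | nil => intro acc i; simp [bcore]
  | cons c r ih =>
    intro acc i
    by_cases hc : c = '?'
    · subst hc
      simp only [List.foldl_cons, if_pos]
      rw [ih]
      simp [bcore, List.count_cons]
      omega
    · simp only [List.foldl_cons, hc, if_neg, not_false_iff]
      rw [ih]
      simp [bcore, hc, List.count_cons]

theorem afold (params : List String) (parts : List (List Char)) :
    ∀ (k : Nat) (fq : List Char) (plist : List String) (idx : Int),
    parts ≠ [] →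
    k + parts.length = params.length + 1 →
    (parts.zipIdx k).foldl
      (fun (acc : List Char × List String × Int) pi =>
        let fq := acc.1 ++ pi.1
        if (pi.2 : Int) < (params.length : Int) then
          (fq ++ '$' :: PySem.Int.toChars acc.2.2,
           acc.2.1 ++ [PySem.List.pyGetD params (pi.2 : Int) ""],
           acc.2.2 + 1)
        else (fq, acc.2.1, acc.2.2)) (fq, plist, idx)
      = (fq ++ weave parts idx, plist ++ params.drop k, idx + (params.length : Int) - k) := by
  induction parts with
  | nil => intro k fq plist idx hne _; exact absurd rfl hne
  | cons p ps ih =>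
    intro k fq plist idx _ hk
    simp only [List.length_cons] at hk
    rw [List.zipIdx_cons, List.foldl_cons]
    by_cases hlast : ps = []
    · subst hlast
      have hk' : k = params.length := by simp only [List.length_nil] at hk; omega
      simp only [List.zipIdx_nil, List.foldl_nil]
      have hguard : ¬ ((k : Int) < (params.length : Int)) := by
        rw [hk']; omega
      simp only [hguard, if_neg, not_false_iff]
      subst hk'
      simp [weave]
    · have hlt : k < params.length := by
        have : 0 < ps.length := List.length_pos_of_ne_nil hlast
        omega
      have hguard : ((k : Int) < (params.length : Int)) := by exact_mod_cast hlt
      simp only [hguard, if_pos]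
      rw [ih (k + 1) _ _ _ hlast (by omega)]
      have hget : PySem.List.pyGetD params (k : Int) "" = params.get ⟨k, hlt⟩ := by
        rw [PySem.List.pyGetD_natCast]
        simp [hlt]
      have hdrop : params.drop k = params.get ⟨k, hlt⟩ :: params.drop (k + 1) := by
        simpa using List.drop_eq_getElem_cons hlt
      have hweave : weave (p :: ps) idx = p ++ '$' :: PySem.Int.toChars idx ++ weave ps (idx + 1) := by
        simp [weave, hlast]
      rw [hweave, hget, hdrop]
      refine Prod.ext (by simp) (Prod.ext (by simp) (by push_cast; ring))

-- ===== VERDICT (by name: the statement is the Claim_ definition above) =====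
theorem format_query_with_indexed_placeholders_py_spec : Claim_equal_format_query_with_indexed_placeholders_py := by
  intro query_template params start_index _hdom hpre
  unfold Spec_format_query_with_indexed_placeholders_py
  unfold format_query_with_indexed_placeholders_py format_query_with_indexed_placeholders_py_alt
  dsimp only
  have hcount : query_template.toList.count '?' = params.length := by
    have := hpre
    unfold Pre_format_query_with_indexed_placeholders_py at this
    rw [PySem.Str.count_eq] at this
    rw [← count_q]
    simpa using this
  rw [splitOn_q, bfold]
  rw [afold params (mySplit query_template.toList) 0 [] [] start_index
      (mySplit_ne_nil _) (by simp [length_mySplit, hcount])]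
  simp [bcore_eq_weave, hcount]
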